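-- pv_equiv track=rewrite | github.com/Martinaa1408/Computational_Method | Lanese/script/recap.py | longest_contiguous_run
-- ===== SOURCE A (Python) =====
-- def longest_contiguous_run(numbers, decreasing=False):
--     """
--     Longest strictly increasing contiguous run (default).
--     If decreasing=True -> strictly decreasing.
--     If tie, keeps the first (so update only if >).
--     """
--     if len(numbers) == 0:
--         return []
--
--     best = [numbers[0]]
--     current = [numbers[0]]
--
--     for i in range(1, len(numbers)):
--         prev = numbers[i - 1]
--         x = numbers[i]
--
--         if not decreasing:
--             ok = (x > prev)
--         else:
--             ok = (x < prev)
--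
--         if ok:
--             current.append(x)
--         else:
--             if len(current) > len(best):
--                 best = current
--             current = [x]
--
--     if len(current) > len(best):
--         best = current
--
--     return best
-- ===== SOURCE B (Python) =====
-- def longest_contiguous_run(numbers, decreasing=False):
--     # Phase 1: split the input into its maximal strictly monotone contiguous segments.
--     segments = []
--     for x in numbers:
--         if segments and ((x < segments[-1][-1]) if decreasing else (x > segments[-1][-1])):
--             segments[-1].append(x)
--         else:
--             segments.append([x])
--     # Phase 2: select the first longest segment.
--     best = []
--     for seg in segments:
--         if len(seg) > len(best):
--             best = seg
--     return best
-- ===== Notes on version B (the rewrite author's own statement) =====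
-- stated objective: alternative
-- what changed: Replaces A's single grow/reset accumulator loop (best/current maintained inline over indices) with a two-phase decomposition: a recursive splitter that first builds the full list of maximal strictly monotone segments, then a separate selection pass keeping the first longest segment.
import Mathlib
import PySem

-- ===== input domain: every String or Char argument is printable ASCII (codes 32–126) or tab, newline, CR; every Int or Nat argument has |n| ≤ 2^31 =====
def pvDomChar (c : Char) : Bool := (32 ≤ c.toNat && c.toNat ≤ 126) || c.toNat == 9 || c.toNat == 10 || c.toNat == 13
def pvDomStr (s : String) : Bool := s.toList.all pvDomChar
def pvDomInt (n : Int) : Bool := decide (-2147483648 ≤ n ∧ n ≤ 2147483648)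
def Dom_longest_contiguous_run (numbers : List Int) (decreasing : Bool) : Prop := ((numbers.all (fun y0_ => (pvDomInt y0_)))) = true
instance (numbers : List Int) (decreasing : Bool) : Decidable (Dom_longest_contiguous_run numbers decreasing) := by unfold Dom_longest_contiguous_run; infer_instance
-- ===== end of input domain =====

-- B replaces A's inline grow/reset accumulator loop by a two-phase decomposition:
-- first build the full list of maximal strictly monotone segments, then a separate
-- pass selects the first longest segment (alternative, same cost).


-- ===== PORT A =====
def longest_contiguous_run (numbers : List Int) (decreasing : Bool) : List Int :=
  if numbers.length == 0 then []
  else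
    let st := (PySem.List.pyRange 1 (numbers.length : Int) 1).foldl
      (fun (st : List Int × List Int) i =>
        let prev := PySem.List.pyGetD numbers (i - 1) 0
        let x := PySem.List.pyGetD numbers i 0
        let ok := if !decreasing then decide (x > prev) else decide (x < prev)
        if ok then (st.1, st.2 ++ [x])
        else (if st.2.length > st.1.length then st.2 else st.1, [x]))
      ([PySem.List.pyGetD numbers 0 0], [PySem.List.pyGetD numbers 0 0])
    if st.2.length > st.1.length then st.2 else st.1

-- ===== PORT B =====
def longest_contiguous_run_alt (numbers : List Int) (decreasing : Bool) : List Int :=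
  let segments := numbers.foldl
    (fun (segments : List (List Int)) x =>
      if !segments.isEmpty &&
          (let lastVal := PySem.List.pyGetD (PySem.List.pyGetD segments (-1) []) (-1) 0
           if decreasing then decide (x < lastVal) else decide (x > lastVal)) then
        segments.dropLast ++ [PySem.List.pyGetD segments (-1) [] ++ [x]]
      else segments ++ [[x]])
    []
  segments.foldl (fun best seg => if seg.length > best.length then seg else best) []

-- ===== PRECONDITION & SPEC =====
def Spec_longest_contiguous_run (numbers : List Int) (decreasing : Bool) (out : List Int) : Prop := out = longest_contiguous_run_alt numbers decreasing
instance (numbers : List Int) (decreasing : Bool) (out : List Int) : Decidable (Spec_longest_contiguous_run numbers decreasing out) := by unfold Spec_longest_contiguous_run; infer_instance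

-- ===== CLAIM (what is proved, stated in full; the proofs are below) =====
def Claim_equal_longest_contiguous_run : Prop := ∀ (numbers : List Int) (decreasing : Bool), Dom_longest_contiguous_run numbers decreasing → Spec_longest_contiguous_run numbers decreasing (longest_contiguous_run numbers decreasing)

-- ===== LEMMAS AND PROOFS =====

-- A's comparison and B's coincide
lemma okB_eq (dec : Bool) (p x : Int) :
    (if dec then decide (x < p) else decide (x > p))
      = (if !dec then decide (x > p) else decide (x < p)) := by
  cases dec <;> rfl

-- selection step shared by both final phases
def updBest (b s : List Int) : List Int := if s.length > b.length then s else b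

-- A's loop step, phrased on an adjacent pair (prev, x)
def stepA (dec : Bool) (st : List Int × List Int) (q : Int × Int) : List Int × List Int :=
  if (if !dec then decide (q.2 > q.1) else decide (q.2 < q.1)) then (st.1, st.2 ++ [q.2])
  else (updBest st.1 st.2, [q.2])

-- B's segment-building step
def segStep (dec : Bool) (segments : List (List Int)) (x : Int) : List (List Int) :=
  if !segments.isEmpty &&
      (let lastVal := PySem.List.pyGetD (PySem.List.pyGetD segments (-1) []) (-1) 0
       if dec then decide (x < lastVal) else decide (x > lastVal)) then
    segments.dropLast ++ [PySem.List.pyGetD segments (-1) [] ++ [x]]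
  else segments ++ [[x]]

-- reference segmentation both loops are reduced to
def splitRunR (dec : Bool) (p : Int) : List Int → List Int × List Int
  | [] => ([], [])
  | x :: xs =>
    if (if !dec then decide (x > p) else decide (x < p)) then
      ((x :: (splitRunR dec x xs).1 : List Int), (splitRunR dec x xs).2)
    else ([], x :: xs)

lemma splitRunR_snd_length (dec : Bool) (p : Int) (xs : List Int) :
    (splitRunR dec p xs).2.length ≤ xs.length := by
  induction xs generalizing p with
  | nil => simp [splitRunR]
  | cons x xs ih =>
    simp only [splitRunR]
    by_cases h : (if !dec then decide (x > p) else decide (x < p)) = true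
    · rw [if_pos h]
      exact le_trans (ih x) (Nat.le_succ _)
    · rw [if_neg h]

def runsR (dec : Bool) : List Int → List (List Int)
  | [] => []
  | x :: xs =>
    (x :: (splitRunR dec x xs).1) :: runsR dec (splitRunR dec x xs).2
termination_by xs => xs.length
decreasing_by
  exact Nat.lt_succ_of_le (splitRunR_snd_length dec x xs)

-- the index loop of A reads exactly the list of adjacent pairs
lemma mapIdx_pairs (xs : List Int) :
    (PySem.List.pyRange 1 (xs.length : Int) 1).map
        (fun i => (PySem.List.pyGetD xs (i - 1) 0, PySem.List.pyGetD xs i 0))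
      = xs.zip xs.tail := by
  apply List.ext_getElem
  · simp [PySem.List.length_pyRange_one]
  · intro k h1 h2
    have hk : k < xs.length - 1 := by
      have := h2; simp at this; omega
    simp only [List.getElem_map, PySem.List.getElem_pyRange_one]
    have e1 : (1 : Int) + (k : Int) - 1 = ((k : Nat) : Int) := by ring
    have e2 : (1 : Int) + (k : Int) = (((k + 1 : Nat)) : Int) := by push_cast; ring
    rw [e1, e2, PySem.List.pyGetD_natCast, PySem.List.pyGetD_natCast]
    rw [List.getElem_zip]
    have hk1 : k < xs.length := by omega
    have hk2 : k + 1 < xs.length := by omega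
    simp [List.getD_eq_getElem?_getD, List.getElem?_eq_getElem hk1,
      List.getElem?_eq_getElem hk2, List.getElem_tail]

-- core invariant for A: folding A's step over the remaining adjacent pairs and
-- finishing with updBest equals selecting over the currently built segment followed
-- by the maximal segments of the remainder
lemma foldl_pairs_runs (dec : Bool) (xs : List Int) : ∀ (p : Int) (b c : List Int),
    updBest (((p :: xs).zip xs).foldl (stepA dec) (b, c)).1
        (((p :: xs).zip xs).foldl (stepA dec) (b, c)).2
      = List.foldl updBest b
          ((c ++ (splitRunR dec p xs).1) :: runsR dec (splitRunR dec p xs).2) := by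
  induction xs with
  | nil => intro p b c; simp [splitRunR, runsR]
  | cons x xs ih =>
    intro p b c
    have hs : splitRunR dec p (x :: xs)
        = if (if !dec then decide (x > p) else decide (x < p)) then
            (x :: (splitRunR dec x xs).1, (splitRunR dec x xs).2)
          else ([], x :: xs) := rfl
    by_cases h : (if !dec then decide (x > p) else decide (x < p)) = true
    · rw [hs, if_pos h]
      simp only [List.zip_cons_cons, List.foldl_cons]
      have hstep : stepA dec (b, c) (p, x) = (b, c ++ [x]) := by
        simp only [stepA]; rw [if_pos h]
      rw [hstep, ih x b (c ++ [x])]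
      simp [List.append_assoc]
    · rw [hs, if_neg h]
      simp only [List.zip_cons_cons, List.foldl_cons]
      have hstep : stepA dec (b, c) (p, x) = (updBest b c, [x]) := by
        simp only [stepA]; rw [if_neg h]
      rw [hstep, ih x (updBest b c) [x]]
      simp only [runsR, List.append_nil, List.singleton_append, List.foldl_cons]

-- core invariant for B: the segment-building fold, applied to a state whose active
-- (last) segment ends in p, produces the finished segments followed by the maximal
-- segments of the remainder
lemma foldl_segStep_runs (dec : Bool) (xs : List Int) :
    ∀ (init : List (List Int)) (c : List Int) (p : Int),
    xs.foldl (segStep dec) (init ++ [c ++ [p]])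
      = init ++ ((c ++ [p] ++ (splitRunR dec p xs).1)
          :: runsR dec (splitRunR dec p xs).2) := by
  induction xs with
  | nil => intro init c p; simp [splitRunR, runsR]
  | cons x xs ih =>
    intro init c p
    have hlast1 : PySem.List.pyGetD (init ++ [c ++ [p]]) (-1) ([] : List Int)
        = c ++ [p] := PySem.List.pyGetD_neg_one_append_singleton init (c ++ [p]) []
    have hlast2 : PySem.List.pyGetD (c ++ [p]) (-1) (0 : Int) = p :=
      PySem.List.pyGetD_neg_one_append_singleton c p 0
    have hc : (!(init ++ [c ++ [p]]).isEmpty &&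
          (if dec then decide (x < p) else decide (x > p)))
        = (if !dec then decide (x > p) else decide (x < p)) := by
      rw [okB_eq]; simp
    have hstep : segStep dec (init ++ [c ++ [p]]) x
        = if (if !dec then decide (x > p) else decide (x < p)) then
            init ++ [(c ++ [p]) ++ [x]]
          else (init ++ [c ++ [p]]) ++ [[x]] := by
      simp only [segStep, hlast1, hlast2, hc, List.dropLast_concat]
    have hs : splitRunR dec p (x :: xs)
        = if (if !dec then decide (x > p) else decide (x < p)) then
            (x :: (splitRunR dec x xs).1, (splitRunR dec x xs).2)
          else ([], x :: xs) := rfl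
    by_cases h : (if !dec then decide (x > p) else decide (x < p)) = true
    · rw [hs, if_pos h]
      simp only [List.foldl_cons, hstep, if_pos h]
      rw [ih init (c ++ [p]) x]
      simp [List.append_assoc]
    · rw [hs, if_neg h]
      simp only [List.foldl_cons, hstep, if_neg h]
      rw [show (init ++ [c ++ [p]]) ++ [[x]] = (init ++ [c ++ [p]]) ++ [[] ++ [x]] by simp]
      rw [ih (init ++ [c ++ [p]]) [] x]
      simp only [runsR, List.append_nil, List.nil_append, List.append_assoc,
        List.cons_append]

-- B's first pass computes exactly the reference segmentation
lemma segs_eq_runs (dec : Bool) (numbers : List Int) :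
    numbers.foldl (segStep dec) [] = runsR dec numbers := by
  cases numbers with
  | nil => simp [runsR]
  | cons x0 rest =>
    have h0 : segStep dec [] x0 = [] ++ [[] ++ [x0]] := rfl
    rw [List.foldl_cons, h0, foldl_segStep_runs dec rest [] [] x0]
    simp only [runsR, List.nil_append, List.singleton_append]

lemma updBest_first_seg (x0 : Int) (r : List Int) :
    updBest [x0] (x0 :: r) = x0 :: r := by
  unfold updBest
  split
  · rfl
  · rename_i h
    have : r = [] := by
      cases r with
      | nil => rfl
      | cons a t => exfalso; apply h; simp
    simp [this]

-- ===== VERDICT (by name: the statement is the Claim_ definition above) =====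
theorem longest_contiguous_run_spec : Claim_equal_longest_contiguous_run := by
  intro numbers decreasing _
  unfold Spec_longest_contiguous_run
  have hB : longest_contiguous_run_alt numbers decreasing
      = (runsR decreasing numbers).foldl updBest [] := by
    unfold longest_contiguous_run_alt
    rw [show numbers.foldl
        (fun (segments : List (List Int)) x =>
          if !segments.isEmpty &&
              (let lastVal := PySem.List.pyGetD (PySem.List.pyGetD segments (-1) []) (-1) 0
               if decreasing then decide (x < lastVal) else decide (x > lastVal)) then
            segments.dropLast ++ [PySem.List.pyGetD segments (-1) [] ++ [x]]
          else segments ++ [[x]]) [] = numbers.foldl (segStep decreasing) [] from rfl]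
    rw [segs_eq_runs]
    rfl
  rw [hB]
  cases numbers with
  | nil => simp [longest_contiguous_run, runsR]
  | cons x0 rest =>
    have hfun : (fun (st : List Int × List Int) i =>
          let prev := PySem.List.pyGetD (x0 :: rest) (i - 1) 0
          let x := PySem.List.pyGetD (x0 :: rest) i 0
          let ok := if !decreasing then decide (x > prev) else decide (x < prev)
          if ok then (st.1, st.2 ++ [x])
          else (if st.2.length > st.1.length then st.2 else st.1, [x]))
        = (fun st i => stepA decreasing st
            (PySem.List.pyGetD (x0 :: rest) (i - 1) 0, PySem.List.pyGetD (x0 :: rest) i 0)) := by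
      funext st i; rfl
    have hzip : (PySem.List.pyRange 1 (((x0 :: rest).length : Int)) 1).foldl
          (fun st i => stepA decreasing st
            (PySem.List.pyGetD (x0 :: rest) (i - 1) 0, PySem.List.pyGetD (x0 :: rest) i 0))
          (([x0], [x0]) : List Int × List Int)
        = ((x0 :: rest).zip (x0 :: rest).tail).foldl (stepA decreasing) ([x0], [x0]) := by
      rw [← mapIdx_pairs (x0 :: rest), List.foldl_map]
    unfold longest_contiguous_run
    rw [if_neg (by simp)]
    simp only [PySem.List.pyGetD_zero_cons]
    rw [hfun, hzip, show (x0 :: rest).tail = rest from rfl]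
    change updBest _ _ = _
    rw [foldl_pairs_runs decreasing rest x0 [x0] [x0]]
    show List.foldl updBest [x0]
        (([x0] ++ (splitRunR decreasing x0 rest).1)
          :: runsR decreasing (splitRunR decreasing x0 rest).2)
      = (runsR decreasing (x0 :: rest)).foldl updBest []
    simp only [runsR, List.foldl_cons, List.singleton_append]
    rw [updBest_first_seg]
    have h0 : updBest [] (x0 :: (splitRunR decreasing x0 rest).1)
        = x0 :: (splitRunR decreasing x0 rest).1 := by
      unfold updBest; simp
    rw [h0]
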